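-- pv_equiv track=rewrite | github.com/team-mayes/md_utils | md_utils/evbdump2data.py | assign_hyd_mol
-- ===== SOURCE A (Python) =====
-- H3O_O_TYPE = 'h3o_o_type'
--
-- def assign_hyd_mol(cfg, hyd_mol):
--     ordered_hyd_mol = []
--     h_atoms = []
--     for atom in hyd_mol:
--         if atom[2] == cfg[H3O_O_TYPE]:
--             ordered_hyd_mol.append(atom)
--         else:
--             h_atoms.append(atom)
--     for atom in h_atoms:
--         ordered_hyd_mol.append(atom)
--     return ordered_hyd_mol
-- ===== SOURCE B (Python) =====
-- H3O_O_TYPE = 'h3o_o_type'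
--
-- def assign_hyd_mol(cfg, hyd_mol):
--     t = cfg[H3O_O_TYPE]
--     return sorted(hyd_mol, key=lambda atom: atom[2] != t)
-- ===== Notes on version B (the rewrite author's own statement) =====
-- stated objective: idiomatic
-- what changed: Replaces the explicit two-accumulator partition loop (matching atoms, then the rest) with a single stable sort keyed on the boolean atom[2] != cfg[H3O_O_TYPE]; stability preserves the relative order within each group, reproducing the partition exactly.
-- outside the precondition, e.g. on assign_hyd_mol({}, []): A returns [], B raises KeyError
import Mathlib
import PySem

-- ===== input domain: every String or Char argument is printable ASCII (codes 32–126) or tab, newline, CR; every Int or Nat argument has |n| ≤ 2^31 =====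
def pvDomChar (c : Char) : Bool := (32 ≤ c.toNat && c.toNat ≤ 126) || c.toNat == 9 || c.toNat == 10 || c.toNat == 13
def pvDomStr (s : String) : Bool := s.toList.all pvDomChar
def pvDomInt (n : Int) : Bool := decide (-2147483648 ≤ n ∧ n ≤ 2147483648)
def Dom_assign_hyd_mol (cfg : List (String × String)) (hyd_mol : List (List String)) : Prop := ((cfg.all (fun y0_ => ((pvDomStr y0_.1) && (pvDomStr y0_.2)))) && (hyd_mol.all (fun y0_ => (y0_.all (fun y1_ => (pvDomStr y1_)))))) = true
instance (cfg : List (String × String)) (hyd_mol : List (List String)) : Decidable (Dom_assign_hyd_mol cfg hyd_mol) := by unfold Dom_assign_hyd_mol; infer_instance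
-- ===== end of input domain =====

-- B replaces A's explicit two-list partition loop by one stable sort on the boolean key
-- atom[2] != cfg['h3o_o_type'] (matches sort first, stability keeps each group's order); idiomatic, not faster.


-- cfg[H3O_O_TYPE]: first-match lookup in the association list (Pre_ guarantees the key is present)
def pvCfgLookup (cfg : List (String × String)) : String :=
  ((cfg.find? (fun p => p.1 == "h3o_o_type")).map (·.2)).getD ""

-- atom[2] (Pre_ guarantees the index is in range)
def pvAtom2 (atom : List String) : String :=
  (PySem.List.pyGet? atom 2).getD ""

-- ===== PORT A =====
def assign_hyd_mol (cfg : List (String × String)) (hyd_mol : List (List String)) : List (List String) :=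
  let t := pvCfgLookup cfg
  let res := hyd_mol.foldl
    (fun (acc : List (List String) × List (List String)) atom =>
      if pvAtom2 atom == t then (acc.1 ++ [atom], acc.2) else (acc.1, acc.2 ++ [atom]))
    ([], [])
  res.1 ++ res.2

-- ===== PORT B =====
-- key atom[2] != t : Python bool; False < True ported as 0 < 1 : Int
def assign_hyd_mol_alt (cfg : List (String × String)) (hyd_mol : List (List String)) : List (List String) :=
  let t := pvCfgLookup cfg
  PySem.List.sorted hyd_mol (fun atom => if pvAtom2 atom == t then (0 : Int) else 1) false

-- ===== PRECONDITION & SPEC =====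
-- Pre_ excludes the inputs on which the Python A raises: a cfg without the key 'h3o_o_type'
-- (KeyError) or an atom with fewer than 3 fields (IndexError); it also excludes a missing key
-- with an empty hyd_mol, where A returns [] without ever reading cfg but B's up-front lookup raises KeyError.
def Pre_assign_hyd_mol (cfg : List (String × String)) (hyd_mol : List (List String)) : Prop :=
  "h3o_o_type" ∈ cfg.map Prod.fst ∧ ∀ atom ∈ hyd_mol, 3 ≤ atom.length
instance (cfg : List (String × String)) (hyd_mol : List (List String)) : Decidable (Pre_assign_hyd_mol cfg hyd_mol) := by unfold Pre_assign_hyd_mol; infer_instance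

def pvWitness_assign_hyd_mol : (List (String × String)) × List (List String) :=
  ([("h3o_o_type", "O")], [["1", "1", "H"], ["2", "1", "O"], ["3", "1", "H"]])

def Spec_assign_hyd_mol (cfg : List (String × String)) (hyd_mol : List (List String)) (out : List (List String)) : Prop := out = assign_hyd_mol_alt cfg hyd_mol
instance (cfg : List (String × String)) (hyd_mol : List (List String)) (out : List (List String)) : Decidable (Spec_assign_hyd_mol cfg hyd_mol out) := by unfold Spec_assign_hyd_mol; infer_instance

-- ===== CLAIM (what is proved, stated in full; the proofs are below) =====
def Claim_equal_assign_hyd_mol : Prop := ∀ (cfg : List (String × String)) (hyd_mol : List (List String)), Dom_assign_hyd_mol cfg hyd_mol → Pre_assign_hyd_mol cfg hyd_mol → Spec_assign_hyd_mol cfg hyd_mol (assign_hyd_mol cfg hyd_mol)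

-- ===== LEMMAS AND PROOFS =====

-- A's partition loop: acc = (matches so far, others so far).
theorem foldlA_shape {α : Type} (p : α → Bool) (xs : List α) :
    ∀ (m o : List α),
    xs.foldl
      (fun (acc : List α × List α) atom =>
        if p atom then (acc.1 ++ [atom], acc.2) else (acc.1, acc.2 ++ [atom]))
      (m, o)
      = (m ++ xs.filter p, o ++ xs.filter (fun a => !(p a))) := by
  induction xs with
  | nil => simp
  | cons x txs ih =>
    intro m o
    by_cases h : p x = true
    · rw [List.foldl_cons, if_pos h, ih, List.filter_cons_of_pos h,
        List.filter_cons_of_neg (by simp [h])]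
      simp
    · rw [List.foldl_cons, if_neg h, ih, List.filter_cons_of_neg h,
        List.filter_cons_of_pos (by simp [Bool.eq_false_iff.mp (by simpa using h)])]
      simp

-- inserting a matching atom (key 0) into (matches ++ others) puts it at the end of the matches
theorem insertBy_match {α : Type} (p : α → Bool) (x : α) (hx : p x = true) :
    ∀ (m o : List α), (∀ a ∈ m, p a = true) → (∀ a ∈ o, p a = false) →
    PySem.List.insertBy
      (fun a b => decide ((if p a then (0 : Int) else 1) < (if p b then (0 : Int) else 1)))
      x (m ++ o) = m ++ x :: o := by
  intro m
  induction m with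
  | nil =>
    intro o _ ho
    cases o with
    | nil => simp [PySem.List.insertBy]
    | cons y ys =>
      have hy : p y = false := ho y (by simp)
      simp [PySem.List.insertBy, hx, hy]
  | cons a m' ih =>
    intro o hm ho
    have ha : p a = true := hm a (by simp)
    simp only [List.cons_append, PySem.List.insertBy, hx, ha, if_true,
      lt_self_iff_false, decide_false, Bool.false_eq_true, if_false]
    rw [ih o (fun b hb => hm b (by simp [hb])) ho]

-- inserting a non-matching atom (key 1, maximal) appends it at the very end
theorem insertBy_nonmatch {α : Type} (p : α → Bool) (x : α) (hx : p x = false) (l : List α) :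
    PySem.List.insertBy
      (fun a b => decide ((if p a then (0 : Int) else 1) < (if p b then (0 : Int) else 1)))
      x l = l ++ [x] := by
  apply PySem.List.insertBy_of_forall_not_before
  intro y _
  by_cases hy : p y = true <;> simp [hx, hy]

-- B's insertion sort maintains the same partition shape
theorem foldlB_shape {α : Type} (p : α → Bool) (xs : List α) :
    ∀ (m o : List α), (∀ a ∈ m, p a = true) → (∀ a ∈ o, p a = false) →
    xs.foldl
      (fun acc x => PySem.List.insertBy
        (fun a b => decide ((if p a then (0 : Int) else 1) < (if p b then (0 : Int) else 1)))
        x acc)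
      (m ++ o)
      = (m ++ xs.filter p) ++ (o ++ xs.filter (fun a => !(p a))) := by
  induction xs with
  | nil => intro m o _ _; simp
  | cons x txs ih =>
    intro m o hm ho
    by_cases h : p x = true
    · rw [List.foldl_cons, insertBy_match p x h m o hm ho]
      have hmx : m ++ x :: o = (m ++ [x]) ++ o := by simp
      rw [hmx, ih (m ++ [x]) o
        (by intro a ha; rcases List.mem_append.mp ha with h' | h'
            · exact hm a h'
            · simp at h'; subst h'; exact h) ho,
        List.filter_cons_of_pos h, List.filter_cons_of_neg (by simp [h])]
      simp
    · have hx : p x = false := by simpa using h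
      rw [List.foldl_cons, insertBy_nonmatch p x hx (m ++ o)]
      have hmo : (m ++ o) ++ [x] = m ++ (o ++ [x]) := by simp
      rw [hmo, ih m (o ++ [x]) hm
        (by intro a ha; rcases List.mem_append.mp ha with h' | h'
            · exact ho a h'
            · simp at h'; subst h'; exact hx),
        List.filter_cons_of_neg h, List.filter_cons_of_pos (by simp [hx])]
      simp

-- ===== VERDICT (by name: the statement is the Claim_ definition above) =====
theorem assign_hyd_mol_spec : Claim_equal_assign_hyd_mol := by
  intro cfg hyd_mol _ _
  show _ = _
  simp only [assign_hyd_mol, assign_hyd_mol_alt, PySem.List.sorted_eq_foldl_insertBy]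
  rw [foldlA_shape (fun atom => pvAtom2 atom == pvCfgLookup cfg) hyd_mol [] []]
  have hB := foldlB_shape (fun atom => pvAtom2 atom == pvCfgLookup cfg) hyd_mol [] [] (by simp) (by simp)
  simp only [List.nil_append] at hB
  rw [hB]
  simp
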